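-- pv_equiv track=rewrite | github.com/k-harada/AtCoder | ABC/ABC151-200/ABC170/C.py | solve
-- ===== SOURCE A (Python) =====
-- def solve(x, n, p_list):
--     diff_min = 101
--     res = 0
--     for i in range(102):
--         if i not in p_list:
--             if abs(x - i) < diff_min:
--                 diff_min = abs(x - i)
--                 res = i
--     return res
-- ===== SOURCE B (Python) =====
-- def solve(x, n, p_list):
--     # Outward search from x by increasing distance; x-d before x+d keeps the
--     # smaller-value tie-break. Returns 0 when no unused value within distance
--     # 100 exists (matching A's default).
--     for d in range(101):
--         c = x - d
--         if 0 <= c <= 101 and c not in p_list: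
--             return c
--         c = x + d
--         if 0 <= c <= 101 and c not in p_list:
--             return c
--     return 0
-- ===== Notes on version B (the rewrite author's own statement) =====
-- stated objective: faster
-- what changed: Replaces A's full scan of 0..101 with a running (min-distance, result) state by an outward search from x that returns the first in-range unused candidate, testing x-d before x+d for d = 0,1,2,...
import Mathlib
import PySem

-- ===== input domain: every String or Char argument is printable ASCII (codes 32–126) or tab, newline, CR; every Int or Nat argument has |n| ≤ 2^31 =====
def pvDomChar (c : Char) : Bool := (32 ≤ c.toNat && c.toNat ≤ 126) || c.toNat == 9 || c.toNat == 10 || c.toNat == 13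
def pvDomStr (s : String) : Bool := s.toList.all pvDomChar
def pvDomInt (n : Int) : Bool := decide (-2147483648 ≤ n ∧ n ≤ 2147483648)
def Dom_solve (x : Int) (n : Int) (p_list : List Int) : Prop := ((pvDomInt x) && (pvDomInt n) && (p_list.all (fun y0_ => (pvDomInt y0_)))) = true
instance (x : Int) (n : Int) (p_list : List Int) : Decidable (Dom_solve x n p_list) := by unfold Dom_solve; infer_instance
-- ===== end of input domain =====

-- B replaces A's full 0..101 scan with a running minimum by an outward search
-- from x (test x-d then x+d for d = 0,1,2,...): a different algorithm, same cost class.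


-- ===== PORT A =====
-- loop body of A's for-loop, as a named helper ('if i not in p_list: if abs(x-i) < diff_min: …')
def solveStep (x : Int) (p_list : List Int) (st : Int × Int) (i : Int) : Int × Int :=
  if ¬ p_list.contains i then
    if |x - i| < st.1 then (|x - i|, i) else st
  else st

def solve (x : Int) (n : Int) (p_list : List Int) : Int :=
  ((PySem.List.pyRange 0 102 1).foldl (solveStep x p_list) (101, 0)).2

-- ===== PORT B =====
-- B's for-loop over d = 0..100: return the first in-range unused candidate, x-d before x+d
def solveAltGo (x : Int) (p_list : List Int) : List Int → Int
  | [] => 0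
  | d :: ds =>
    if 0 ≤ x - d ∧ x - d ≤ 101 ∧ ¬ p_list.contains (x - d) then x - d
    else if 0 ≤ x + d ∧ x + d ≤ 101 ∧ ¬ p_list.contains (x + d) then x + d
    else solveAltGo x p_list ds

def solve_alt (x : Int) (n : Int) (p_list : List Int) : Int :=
  solveAltGo x p_list (PySem.List.pyRange 0 101 1)

-- ===== PRECONDITION & SPEC =====
def Spec_solve (x : Int) (n : Int) (p_list : List Int) (out : Int) : Prop := out = solve_alt x n p_list
instance (x : Int) (n : Int) (p_list : List Int) (out : Int) : Decidable (Spec_solve x n p_list out) := by unfold Spec_solve; infer_instance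

-- ===== CLAIM (what is proved, stated in full; the proofs are below) =====
def Claim_equal_solve : Prop := ∀ (x : Int) (n : Int) (p_list : List Int), Dom_solve x n p_list → Spec_solve x n p_list (solve x n p_list)

-- ===== LEMMAS AND PROOFS =====

-- a usable value: in range 0..101 and not used
def pvGood (p_list : List Int) (c : Int) : Prop := 0 ≤ c ∧ c ≤ 101 ∧ ¬ p_list.contains c

-- no usable value within distance 100 of x
def pvNoCand (x : Int) (p_list : List Int) : Prop := ∀ c, pvGood p_list c → 101 ≤ |x - c|

-- c is the answer: usable, within distance 100, lex-minimal by (distance, value)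
def pvIsAns (x : Int) (p_list : List Int) (c : Int) : Prop :=
  pvGood p_list c ∧ |x - c| ≤ 100 ∧
    ∀ j, pvGood p_list j → 102 * |x - c| + c ≤ 102 * |x - j| + j

-- A's fold keeps its state when every unused element of L is no closer than the current best
theorem foldA_const (x : Int) (p : List Int) (L : List Int) (dm r : Int)
    (h : ∀ i ∈ L, ¬ p.contains i → dm ≤ |x - i|) :
    L.foldl (solveStep x p) (dm, r) = (dm, r) := by
  induction L with
  | nil => rfl
  | cons i L ih =>
    have hi := h i (by simp)
    rw [List.foldl_cons]
    have hstep : solveStep x p (dm, r) i = (dm, r) := by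
      by_cases hc : p.contains i
      · have hm : i ∈ p := by simpa using hc
        simp [solveStep, hm]
      · have hm : i ∉ p := by simpa using hc
        simp [solveStep, hm, not_lt.mpr (hi hc)]
    rw [hstep]
    exact ih (fun j hj => h j (by simp [hj]))

-- A's fold never drops the running minimum below a lower bound valid for all of L
theorem foldA_lb (x : Int) (p : List Int) (L : List Int) (dm r dmin : Int)
    (hdm : dmin ≤ dm)
    (h : ∀ i ∈ L, ¬ p.contains i → dmin ≤ |x - i|) :
    dmin ≤ (L.foldl (solveStep x p) (dm, r)).1 := by
  induction L generalizing dm r with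
  | nil => exact hdm
  | cons i L ih =>
    rw [List.foldl_cons]
    by_cases hc : p.contains i
    · have hm : i ∈ p := by simpa using hc
      have hstep : solveStep x p (dm, r) i = (dm, r) := by simp [solveStep, hm]
      rw [hstep]
      exact ih dm r hdm (fun j hj => h j (by simp [hj]))
    · have hm : i ∉ p := by simpa using hc
      by_cases hlt : |x - i| < dm
      · have hstep : solveStep x p (dm, r) i = (|x - i|, i) := by simp [solveStep, hm, hlt]
        rw [hstep]
        exact ih _ _ (h i (by simp) hc) (fun j hj => h j (by simp [hj]))
      · have hstep : solveStep x p (dm, r) i = (dm, r) := by simp [solveStep, hm, hlt]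
        rw [hstep]
        exact ih dm r hdm (fun j hj => h j (by simp [hj]))

theorem solve_of_noCand (x n : Int) (p : List Int) (h : pvNoCand x p) :
    solve x n p = 0 := by
  unfold solve
  rw [foldA_const x p _ 101 0]
  intro i hi hc
  rw [PySem.List.mem_pyRange_one] at hi
  exact h i ⟨hi.1, by omega, hc⟩

theorem solve_of_isAns (x n : Int) (p : List Int) (c : Int) (h : pvIsAns x p c) :
    solve x n p = c := by
  obtain ⟨⟨hc0, hc1, hcp⟩, hd, hmin⟩ := h
  unfold solve
  rw [PySem.List.pyRange_one_append 0 c 102 hc0 (by omega),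
      PySem.List.pyRange_one_cons (a := c) (b := 102) (by omega), List.foldl_append]
  have habs : 0 ≤ |x - c| := abs_nonneg _
  -- prefix 0..c-1: running minimum stays > |x - c|
  have h1 : |x - c| + 1 ≤ ((PySem.List.pyRange 0 c 1).foldl (solveStep x p) (101, 0)).1 := by
    apply foldA_lb x p _ 101 0 (|x - c| + 1) (by omega)
    intro i hi hic
    rw [PySem.List.mem_pyRange_one] at hi
    have := hmin i ⟨hi.1, by omega, hic⟩
    have hlt : i < c := hi.2
    omega
  -- step at c takes (|x-c|, c)
  obtain ⟨st, hst⟩ : ∃ st, (PySem.List.pyRange 0 c 1).foldl (solveStep x p) (101, 0) = st :=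
    ⟨_, rfl⟩
  rw [hst] at h1 ⊢
  have hstep : solveStep x p st c = (|x - c|, c) := by
    have hm : c ∉ p := by simpa using hcp
    simp [solveStep, hm, show |x - c| < st.1 by omega]
  rw [List.foldl_cons, hstep]
  -- suffix c+1..101: no unused element is strictly closer
  rw [foldA_const x p _ (|x - c|) c]
  intro j hj hjc
  rw [PySem.List.mem_pyRange_one] at hj
  have := hmin j ⟨by omega, by omega, hjc⟩
  omega

-- both candidates at distance d fail B's test
def pvFails (x : Int) (p_list : List Int) (d : Int) : Prop :=
  ¬ (0 ≤ x - d ∧ x - d ≤ 101 ∧ ¬ p_list.contains (x - d)) ∧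
  ¬ (0 ≤ x + d ∧ x + d ≤ 101 ∧ ¬ p_list.contains (x + d))

theorem go_append (x : Int) (p : List Int) (L1 L2 : List Int)
    (h : ∀ d ∈ L1, pvFails x p d) :
    solveAltGo x p (L1 ++ L2) = solveAltGo x p L2 := by
  induction L1 with
  | nil => rfl
  | cons d L1 ih =>
    have hd := h d (by simp)
    simp only [List.cons_append, solveAltGo, if_neg hd.1, if_neg hd.2]
    exact ih (fun e he => h e (by simp [he]))

theorem solve_alt_of_noCand (x n : Int) (p : List Int) (h : pvNoCand x p) :
    solve_alt x n p = 0 := by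
  unfold solve_alt
  have : PySem.List.pyRange 0 101 1 = PySem.List.pyRange 0 101 1 ++ [] := by simp
  rw [this, go_append]
  · rfl
  · intro d hd
    rw [PySem.List.mem_pyRange_one] at hd
    constructor
    · rintro ⟨h0, h1, hc⟩
      have := h (x - d) ⟨h0, h1, hc⟩
      have : |x - (x - d)| = d := by rw [show x - (x - d) = d by ring]; exact abs_of_nonneg hd.1
      omega
    · rintro ⟨h0, h1, hc⟩
      have := h (x + d) ⟨h0, h1, hc⟩
      have : |x - (x + d)| = d := by
        rw [show x - (x + d) = -d by ring, abs_neg]; exact abs_of_nonneg hd.1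
      omega

theorem solve_alt_of_isAns (x n : Int) (p : List Int) (c : Int) (h : pvIsAns x p c) :
    solve_alt x n p = c := by
  obtain ⟨⟨hc0, hc1, hcp⟩, hd, hmin⟩ := h
  have habs : 0 ≤ |x - c| := abs_nonneg _
  unfold solve_alt
  rw [PySem.List.pyRange_one_append 0 (|x - c|) 101 habs (by omega),
      PySem.List.pyRange_one_cons (a := |x - c|) (b := 101) (by omega), go_append]
  · -- at distance d = |x - c| the loop returns c
    by_cases hxc : c ≤ x
    · -- x ≥ c : c = x - |x - c|
      have habs' : |x - c| = x - c := abs_of_nonneg (by omega)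
      have hcand : x - |x - c| = c := by omega
      simp only [solveAltGo, hcand]
      rw [if_pos ⟨hc0, hc1, hcp⟩]
    · have hxc' : x < c := by omega
      -- x < c: c = x + |x - c|; x - |x-c| cannot pass (it would beat c)
      have habs' : |x - c| = c - x := by rw [abs_sub_comm]; exact abs_of_nonneg (by omega)
      have hcand : x + |x - c| = c := by omega
      have hfail : ¬ (0 ≤ x - |x - c| ∧ x - |x - c| ≤ 101 ∧ ¬ p.contains (x - |x - c|)) := by
        rintro ⟨h0, h1, hc'⟩
        have := hmin (x - |x - c|) ⟨h0, h1, hc'⟩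
        have : |x - (x - |x - c|)| = |x - c| := by
          rw [show x - (x - |x - c|) = |x - c| by ring]; exact abs_of_nonneg habs
        omega
      simp only [solveAltGo, if_neg hfail, hcand]
      rw [if_pos ⟨hc0, hc1, hcp⟩]
  · -- distances below |x - c| : both candidates fail
    intro d hdm
    rw [PySem.List.mem_pyRange_one] at hdm
    constructor
    · rintro ⟨h0, h1, hc'⟩
      have := hmin (x - d) ⟨h0, h1, hc'⟩
      have : |x - (x - d)| = d := by rw [show x - (x - d) = d by ring]; exact abs_of_nonneg hdm.1
      omega
    · rintro ⟨h0, h1, hc'⟩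
      have := hmin (x + d) ⟨h0, h1, hc'⟩
      have : |x - (x + d)| = d := by
        rw [show x - (x + d) = -d by ring, abs_neg]; exact abs_of_nonneg hdm.1
      omega

-- if some usable value lies within distance 100, a lex-minimal one exists
theorem exists_isAns (x : Int) (p : List Int) (h : ¬ pvNoCand x p) :
    ∃ c, pvIsAns x p c := by
  unfold pvNoCand at h
  push Not at h
  obtain ⟨c0, hg0, hd0⟩ := h
  have hmem : c0 ∈ (Finset.Icc (0 : Int) 101).filter
      (fun c => ¬ p.contains c ∧ |x - c| ≤ 100) := by
    simp only [Finset.mem_filter, Finset.mem_Icc]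
    exact ⟨⟨hg0.1, hg0.2.1⟩, hg0.2.2, by omega⟩
  obtain ⟨c, hc, hcmin⟩ := Finset.exists_min_image _ (fun c => 102 * |x - c| + c) ⟨c0, hmem⟩
  simp only [Finset.mem_filter, Finset.mem_Icc] at hc
  refine ⟨c, ⟨hc.1.1, hc.1.2, hc.2.1⟩, hc.2.2, ?_⟩
  intro j hj
  by_cases hjd : |x - j| ≤ 100
  · have hjm : j ∈ (Finset.Icc (0 : Int) 101).filter
        (fun c => ¬ p.contains c ∧ |x - c| ≤ 100) := by
      simp only [Finset.mem_filter, Finset.mem_Icc]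
      exact ⟨⟨hj.1, hj.2.1⟩, hj.2.2, hjd⟩
    exact hcmin j hjm
  · have h1 : 0 ≤ c := hc.1.1
    have h2 : c ≤ 101 := hc.1.2
    have h3 : |x - c| ≤ 100 := hc.2.2
    have h4 : 0 ≤ j := hj.1
    omega

-- ===== VERDICT (by name: the statement is the Claim_ definition above) =====
theorem solve_spec : Claim_equal_solve := by
  intro x n p _
  unfold Spec_solve
  by_cases h : pvNoCand x p
  · rw [solve_of_noCand x n p h, solve_alt_of_noCand x n p h]
  · obtain ⟨c, hc⟩ := exists_isAns x p h
    rw [solve_of_isAns x n p c hc, solve_alt_of_isAns x n p c hc]
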